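-- pv_equiv track=rewrite | github.com/AllPurposeDave/DPS | scripts/shared_utils.py | _split_by_subheaders
-- ===== SOURCE A (Python) =====
-- def _is_subheader(row):
--     """Check if a row is a sub-header (starts with single # but not ##).
--
--     Convention: '# Section Name' = sub-header (block delimiter).
--     '## description text' = inline help comment (not a delimiter).
--     """
--     if not row or not row[0]:
--         return False
--     val = str(row[0]).strip()
--     return val.startswith("#") and not val.startswith("##")
--
-- def _split_by_subheaders(rows):
--     """Split rows into named blocks at # sub-headers. Returns list of (name, rows) tuples."""
--     blocks = []
--     current_name = ""
--     current_rows = []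
--     for row in rows:
--         if _is_subheader(row):
--             if current_rows:
--                 blocks.append((current_name, current_rows))
--             current_name = str(row[0]).strip().lstrip("# ").strip()
--             current_rows = []
--         else:
--             current_rows.append(row)
--     if current_rows:
--         blocks.append((current_name, current_rows))
--     return blocks
-- ===== SOURCE B (Python) =====
-- def _is_subheader(row):
--     if not row or not row[0]:
--         return False
--     val = str(row[0]).strip()
--     return val.startswith("#") and not val.startswith("##")
--
--
-- def _split_by_subheaders(rows):
--     """Split rows into named blocks: partition rows into maximal runs of
--     subheader / non-subheader rows, then pair each data run with the name
--     taken from the last subheader of the run preceding it."""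
--     blocks = []
--     name = ""
--     i, n = 0, len(rows)
--     while i < n:
--         flag = _is_subheader(rows[i])
--         j = i + 1
--         while j < n and _is_subheader(rows[j]) == flag:
--             j += 1
--         if flag:
--             name = str(rows[j - 1][0]).strip().lstrip("# ").strip()
--         else:
--             blocks.append((name, rows[i:j]))
--         i = j
--     return blocks
-- ===== Notes on version B (the rewrite author's own statement) =====
-- stated objective: alternative
-- what changed: Replaced A's per-row flush-on-delimiter state machine (blocks/current_name/current_rows) by a two-phase run scan: partition rows into maximal subheader/non-subheader runs, take the block name from the last subheader of each subheader run and emit each data run directly as a block.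
import Mathlib
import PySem

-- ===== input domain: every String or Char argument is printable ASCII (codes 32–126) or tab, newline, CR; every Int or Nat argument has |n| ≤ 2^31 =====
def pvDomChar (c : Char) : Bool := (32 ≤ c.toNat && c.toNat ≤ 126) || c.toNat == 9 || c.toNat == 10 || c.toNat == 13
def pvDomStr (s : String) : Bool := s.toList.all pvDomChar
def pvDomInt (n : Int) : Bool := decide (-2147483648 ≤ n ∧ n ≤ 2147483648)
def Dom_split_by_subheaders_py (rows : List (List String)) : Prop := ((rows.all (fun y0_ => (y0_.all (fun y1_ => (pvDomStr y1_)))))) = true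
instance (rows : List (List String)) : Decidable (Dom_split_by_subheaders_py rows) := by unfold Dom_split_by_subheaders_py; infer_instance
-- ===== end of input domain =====

-- B replaces A's per-row flush-on-delimiter state machine by a two-phase scan over
-- maximal subheader/non-subheader runs (objective: alternative decomposition, same cost).

-- ===== PORT A =====

-- _is_subheader(row): row nonempty, row[0] non-empty string, stripped value starts with '#' but not '##'
def pvIsSub (row : List String) : Bool :=
  match row with
  | [] => false
  | v :: _ =>
    if v = "" then false
    else
      let val := PySem.Str.strip v
      PySem.Str.startswith val "#" && !(PySem.Str.startswith val "##")

-- str(row[0]).strip().lstrip("# ").strip(); called only on rows with pvIsSub = true (nonempty),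
-- so headD "" is row[0]. lstrip("# ") = drop leading chars in {'#',' '} (exact hand port).
def pvName (row : List String) : String :=
  let v := PySem.Str.strip (row.headD "")
  PySem.Str.strip (String.ofList (v.toList.dropWhile (fun c => c == '#' || c == ' ')))

-- A's loop: state (blocks, current_name, current_rows)
def pvALoop : List (List String) → List (String × List (List String)) → String → List (List String) → List (String × List (List String))
  | [], blocks, name, cur => blocks ++ (if cur.isEmpty then [] else [(name, cur)])
  | row :: rest, blocks, name, cur =>
    if pvIsSub row then
      pvALoop rest (blocks ++ (if cur.isEmpty then [] else [(name, cur)])) (pvName row) []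
    else
      pvALoop rest blocks name (cur ++ [row])

def split_by_subheaders_py (rows : List (List String)) : List (String × List (List String)) := pvALoop rows [] "" []

-- ===== PORT B =====

-- B's outer while loop: extract the maximal run sharing the head's flag, then either
-- update the name (subheader run: last element's name) or emit a block (data run).
def pvBLoop (l : List (List String)) (name : String) : List (String × List (List String)) :=
  match l with
  | [] => []
  | row :: rest =>
    let flag := pvIsSub row
    let run := row :: rest.takeWhile (fun r => pvIsSub r == flag)
    let rest' := rest.dropWhile (fun r => pvIsSub r == flag)
    if flag then pvBLoop rest' (pvName (run.getLastD []))
    else (name, run) :: pvBLoop rest' name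
termination_by l.length
decreasing_by
  all_goals
    simpa using Nat.lt_succ_of_le (List.length_dropWhile_le _ _)

def split_by_subheaders_py_alt (rows : List (List String)) : List (String × List (List String)) := pvBLoop rows ""

-- ===== PRECONDITION & SPEC =====
def Spec_split_by_subheaders_py (rows : List (List String)) (out : List (String × List (List String))) : Prop := out = split_by_subheaders_py_alt rows
instance (rows : List (List String)) (out : List (String × List (List String))) : Decidable (Spec_split_by_subheaders_py rows out) := by unfold Spec_split_by_subheaders_py; infer_instance

-- ===== CLAIM (what is proved, stated in full; the proofs are below) =====
def Claim_equal_split_by_subheaders_py : Prop := ∀ (rows : List (List String)), Dom_split_by_subheaders_py rows → Spec_split_by_subheaders_py rows (split_by_subheaders_py rows)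

-- ===== LEMMAS AND PROOFS =====

theorem pvALoop_prefix (rows : List (List String)) (blocks : List (String × List (List String)))
    (name : String) (cur : List (List String)) :
    pvALoop rows blocks name cur = blocks ++ pvALoop rows [] name cur := by
  induction rows generalizing blocks name cur with
  | nil => simp [pvALoop]
  | cons row rest ih =>
    simp only [pvALoop]
    by_cases h : pvIsSub row = true
    · rw [if_pos h, if_pos h,
        ih (blocks ++ if cur.isEmpty then [] else [(name, cur)]) (pvName row) [],
        ih (([] : List (String × List (List String))) ++ if cur.isEmpty then [] else [(name, cur)]) (pvName row) []]
      simp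
    · rw [if_neg h, if_neg h]
      exact ih blocks name (cur ++ [row])

theorem pvALoop_nonsub (nrun rest : List (List String)) (name : String) (cur : List (List String))
    (h : ∀ r ∈ nrun, pvIsSub r = false) :
    pvALoop (nrun ++ rest) [] name cur = pvALoop rest [] name (cur ++ nrun) := by
  induction nrun generalizing cur with
  | nil => simp
  | cons x t ih =>
    have hx : ¬ pvIsSub x = true := by simp [h x (by simp)]
    simp only [List.cons_append, pvALoop]
    rw [if_neg hx, ih (cur ++ [x]) (fun r hr => h r (by simp [hr]))]
    simp

theorem pvALoop_subrun (srun rest : List (List String)) (name : String)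
    (h : ∀ r ∈ srun, pvIsSub r = true) (hne : srun ≠ []) :
    pvALoop (srun ++ rest) [] name [] = pvALoop rest [] (pvName (srun.getLastD [])) [] := by
  induction srun generalizing name with
  | nil => exact absurd rfl hne
  | cons x t ih =>
    have hx : pvIsSub x = true := h x (by simp)
    cases t with
    | nil => simp [pvALoop, hx]
    | cons y t' =>
      simp only [List.cons_append]
      have step : pvALoop (x :: (y :: (t' ++ rest))) [] name [] =
          pvALoop (y :: (t' ++ rest)) [] (pvName x) [] := by
        simp [pvALoop, hx]
      rw [step]
      have := ih (pvName x) (fun r hr => h r (by simp [hr])) (by simp)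
      simpa [List.getLastD] using this

theorem pvALoop_eq_pvBLoop (n : ℕ) : ∀ rows : List (List String), ∀ name : String,
    rows.length ≤ n → pvALoop rows [] name [] = pvBLoop rows name := by
  induction n with
  | zero =>
    intro rows name hlen
    have : rows = [] := List.length_eq_zero_iff.mp (Nat.le_zero.mp hlen)
    subst this
    simp [pvALoop, pvBLoop]
  | succ n ih =>
    intro rows name hlen
    cases rows with
    | nil => simp [pvALoop, pvBLoop]
    | cons row rest =>
      simp only [List.length_cons] at hlen
      by_cases hf : pvIsSub row = true
      · -- subheader run: A consumes it (pvALoop_subrun); B extracts the same run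
        have htk : ∀ r ∈ rest.takeWhile (fun r => pvIsSub r), pvIsSub r = true := by
          intro r hr; simpa using List.mem_takeWhile_imp hr
        have hall : ∀ r ∈ row :: rest.takeWhile (fun r => pvIsSub r), pvIsSub r = true := by
          intro r hr
          rcases List.mem_cons.mp hr with h1 | h2
          · subst h1; exact hf
          · exact htk r h2
        have hdrlen : (rest.dropWhile (fun r => pvIsSub r)).length ≤ n := by
          have := List.length_dropWhile_le (fun r => pvIsSub r) rest
          omega
        have h1 : pvALoop (row :: rest) [] name [] =
            pvALoop (rest.dropWhile (fun r => pvIsSub r)) []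
              (pvName ((row :: rest.takeWhile (fun r => pvIsSub r)).getLastD [])) [] := by
          conv_lhs => rw [show row :: rest =
            (row :: rest.takeWhile (fun r => pvIsSub r)) ++ rest.dropWhile (fun r => pvIsSub r) by
              simp]
          exact pvALoop_subrun _ _ _ hall (by simp)
        rw [h1, ih _ _ hdrlen]
        conv_rhs => rw [pvBLoop]
        simp [hf]
      · -- data run: A accumulates it and flushes at the next subheader / at the end
        have hfF : pvIsSub row = false := by simpa using hf
        have htk : ∀ r ∈ rest.takeWhile (fun r => !pvIsSub r), pvIsSub r = false := by
          intro r hr; simpa using List.mem_takeWhile_imp hr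
        have hall : ∀ r ∈ row :: rest.takeWhile (fun r => !pvIsSub r), pvIsSub r = false := by
          intro r hr
          rcases List.mem_cons.mp hr with h1 | h2
          · subst h1; exact hfF
          · exact htk r h2
        have hdrlen : (rest.dropWhile (fun r => !pvIsSub r)).length ≤ n := by
          have := List.length_dropWhile_le (fun r => !pvIsSub r) rest
          omega
        have h1 : pvALoop (row :: rest) [] name [] =
            pvALoop (rest.dropWhile (fun r => !pvIsSub r)) [] name
              (row :: rest.takeWhile (fun r => !pvIsSub r)) := by
          conv_lhs => rw [show row :: rest =
            (row :: rest.takeWhile (fun r => !pvIsSub r)) ++ rest.dropWhile (fun r => !pvIsSub r) by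
              simp]
          exact pvALoop_nonsub _ _ _ [] hall
        have hB : pvBLoop (row :: rest) name =
            (name, row :: rest.takeWhile (fun r => !pvIsSub r)) ::
              pvBLoop (rest.dropWhile (fun r => !pvIsSub r)) name := by
          conv_lhs => rw [pvBLoop]
          simp [hfF]
        rw [h1, hB]
        cases hdr : rest.dropWhile (fun r => !pvIsSub r) with
        | nil => simp [pvALoop, pvBLoop]
        | cons d t =>
          have hd : pvIsSub d = true := by
            have := List.head?_dropWhile_not (fun r => !pvIsSub r) rest
            rw [hdr] at this
            simpa using this
          have h2 : pvBLoop (d :: t) name = pvALoop t [] (pvName d) [] := by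
            rw [← ih (d :: t) name (by rw [← hdr]; exact hdrlen)]
            simp [pvALoop, hd]
          rw [h2]
          simp only [pvALoop]
          rw [if_pos hd]
          simp only [List.isEmpty_cons, if_neg Bool.false_ne_true, List.nil_append]
          rw [pvALoop_prefix]
          simp

-- ===== VERDICT (by name: the statement is the Claim_ definition above) =====
theorem split_by_subheaders_py_spec : Claim_equal_split_by_subheaders_py := by
  intro rows _
  unfold Spec_split_by_subheaders_py split_by_subheaders_py split_by_subheaders_py_alt
  exact pvALoop_eq_pvBLoop rows.length rows "" le_rfl
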